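-- pv_equiv track=rewrite | github.com/S3nna13/Aurelius | src/eval/swebench_lite_scorer.py | _split_into_file_sections
-- ===== SOURCE A (Python) =====
-- def _split_into_file_sections(diff: str) -> list[list[str]]:
--     """Group diff lines into sections, one per file."""
--     lines = diff.splitlines()
--     sections: list[list[str]] = []
--     current: list[str] = []
--     i = 0
--     while i < len(lines):
--         line = lines[i]
--         if line.startswith("diff --git") or line.startswith("--- "):
--             if current:
--                 sections.append(current)
--             current = [line]
--         else:
--             if not current:
--                 # Stray prelude lines before first header; ignore.
--                 i += 1
--                 continue
--             current.append(line)
--         i += 1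
--     if current:
--         sections.append(current)
--     return sections
-- ===== SOURCE B (Python) =====
-- def _split_into_file_sections(diff: str) -> list[list[str]]:
--     """Group diff lines into sections, one per file."""
--     lines = diff.splitlines()
--     idxs = [i for i, line in enumerate(lines)
--             if line.startswith("diff --git") or line.startswith("--- ")]
--     return [lines[start:end]
--             for start, end in zip(idxs, idxs[1:] + [len(lines)])]
-- ===== Notes on version B (the rewrite author's own statement) =====
-- stated objective: alternative
-- what changed: Replaces A's stateful accumulator while-loop (current section built line by line, flushed on each header) by a two-phase decomposition: one pass collecting header-line indices, then building the result as slices of the line list between consecutive header indices.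
import Mathlib
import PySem

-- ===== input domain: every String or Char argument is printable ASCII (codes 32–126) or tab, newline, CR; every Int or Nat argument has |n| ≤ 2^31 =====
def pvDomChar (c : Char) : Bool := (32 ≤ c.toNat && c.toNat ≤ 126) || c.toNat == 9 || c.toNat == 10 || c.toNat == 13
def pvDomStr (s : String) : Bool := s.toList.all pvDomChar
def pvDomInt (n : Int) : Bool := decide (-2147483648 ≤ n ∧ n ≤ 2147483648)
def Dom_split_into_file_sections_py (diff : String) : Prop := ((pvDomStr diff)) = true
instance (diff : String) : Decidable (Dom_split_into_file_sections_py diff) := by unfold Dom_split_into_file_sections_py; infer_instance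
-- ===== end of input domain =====

-- B replaces A's single stateful accumulator loop by an index pass + slicing between
-- consecutive header indices (objective: alternative decomposition, same O(n) cost).

-- shared header test: line.startswith("diff --git") or line.startswith("--- ")
def pvIsHeader (line : String) : Bool :=
  PySem.Str.startswith line "diff --git" || PySem.Str.startswith line "--- "

-- ===== PORT A =====
-- A's while-loop: state (sections, current), one step per line (the 'continue' only skips).
def pvLoopA : List String → List (List String) → List String → List (List String)
  | [], sections, current =>
      if current.isEmpty then sections else sections ++ [current]
  | line :: rest, sections, current =>
      if pvIsHeader line then
        pvLoopA rest (if current.isEmpty then sections else sections ++ [current]) [line]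
      else
        if current.isEmpty then pvLoopA rest sections current
        else pvLoopA rest sections (current ++ [line])

def split_into_file_sections_py (diff : String) : List (List String) :=
  pvLoopA (PySem.Str.splitlines diff) [] []

-- ===== PORT B =====
def split_into_file_sections_py_alt (diff : String) : List (List String) :=
  let lines := PySem.Str.splitlines diff
  let idxs : List Int :=
    (PySem.List.enumerate lines).filterMap (fun p => if pvIsHeader p.2 then some p.1 else none)
  (idxs.zip (idxs.drop 1 ++ [(lines.length : Int)])).map
    (fun p => PySem.List.slice lines (some p.1) (some p.2))

-- ===== PRECONDITION & SPEC =====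
def Spec_split_into_file_sections_py (diff : String) (out : List (List String)) : Prop := out = split_into_file_sections_py_alt diff
instance (diff : String) (out : List (List String)) : Decidable (Spec_split_into_file_sections_py diff out) := by unfold Spec_split_into_file_sections_py; infer_instance

-- ===== CLAIM (what is proved, stated in full; the proofs are below) =====
def Claim_equal_split_into_file_sections_py : Prop := ∀ (diff : String), Dom_split_into_file_sections_py diff → Spec_split_into_file_sections_py diff (split_into_file_sections_py diff)

-- ===== LEMMAS AND PROOFS =====

-- canonical grouping both ports are proved equal to
def pvGroups : List String → List (List String)
  | [] => []
  | l :: rest =>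
      if pvIsHeader l then
        (l :: rest.takeWhile (fun x => !pvIsHeader x)) :: pvGroups (rest.dropWhile (fun x => !pvIsHeader x))
      else pvGroups rest
termination_by lines => lines.length
decreasing_by
  · have := List.length_dropWhile_le (fun x => !pvIsHeader x) rest; simp; omega
  · simp

-- natural-number header indices
def pvHIdx : List String → List Nat
  | [] => []
  | l :: rest =>
      if pvIsHeader l then 0 :: (pvHIdx rest).map (· + 1) else (pvHIdx rest).map (· + 1)

lemma pvGroups_dropWhile (lines : List String) :
    pvGroups (lines.dropWhile (fun x => !pvIsHeader x)) = pvGroups lines := by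
  induction lines with
  | nil => rfl
  | cons l rest ih =>
      by_cases h : pvIsHeader l = true <;> simp [List.dropWhile, h, pvGroups, ih]

lemma pvTakeWhile_eq_take (lines : List String) :
    lines.takeWhile (fun x => !pvIsHeader x) = lines.take ((pvHIdx lines).headD lines.length) := by
  induction lines with
  | nil => rfl
  | cons l rest ih =>
      by_cases h : pvIsHeader l = true
      · simp [List.takeWhile, h, pvHIdx]
      · cases hh : pvHIdx rest <;>
          simp_all [List.takeWhile, pvHIdx, List.take_succ_cons]

lemma pvDropWhile_eq_drop (lines : List String) :
    lines.dropWhile (fun x => !pvIsHeader x) = lines.drop ((pvHIdx lines).headD lines.length) := by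
  induction lines with
  | nil => rfl
  | cons l rest ih =>
      by_cases h : pvIsHeader l = true
      · simp [List.dropWhile, h, pvHIdx]
      · cases hh : pvHIdx rest <;>
          simp_all [List.dropWhile, pvHIdx]

-- ----- A side -----

lemma pvLoopA_nonempty (lines : List String) :
    ∀ (sections : List (List String)) (cur : List String), cur ≠ [] →
    pvLoopA lines sections cur =
      sections ++ [cur ++ lines.takeWhile (fun x => !pvIsHeader x)]
        ++ pvGroups (lines.dropWhile (fun x => !pvIsHeader x)) := by
  induction lines with
  | nil =>
      intro sections cur hc
      simp [pvLoopA, List.isEmpty_iff, hc, pvGroups]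
  | cons l rest ih =>
      intro sections cur hc
      by_cases h : pvIsHeader l = true
      · rw [pvLoopA]
        rw [if_pos h, if_neg (by simp [hc]), ih _ [l] (by simp)]
        simp [List.takeWhile, List.dropWhile, h, pvGroups]
      · rw [pvLoopA]
        rw [if_neg (by simp [h]), if_neg (by simp [hc]), ih _ (cur ++ [l]) (by simp)]
        simp [List.takeWhile, List.dropWhile, h]

lemma pvLoopA_empty (lines : List String) (sections : List (List String)) :
    pvLoopA lines sections [] = sections ++ pvGroups lines := by
  induction lines generalizing sections with
  | nil => simp [pvLoopA, pvGroups]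
  | cons l rest ih =>
      by_cases h : pvIsHeader l = true
      · rw [pvLoopA]
        rw [if_pos h, if_pos (by simp), pvLoopA_nonempty rest _ [l] (by simp)]
        simp [pvGroups, h]
      · rw [pvLoopA]
        rw [if_neg (by simp [h]), if_pos (by simp), ih, pvGroups]
        simp [h]

-- ----- B side -----

lemma pvEnum_filterMap (lines : List String) (s : Int) :
    (PySem.List.enumerate lines s).filterMap
        (fun p => if pvIsHeader p.2 then some p.1 else none) =
      (pvHIdx lines).map (fun k : Nat => s + (k : Int)) := by
  induction lines generalizing s with
  | nil => simp [PySem.List.enumerate_nil, pvHIdx]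
  | cons l rest ih =>
      have hm : ∀ t : List Nat,
          (t.map (· + 1)).map (fun k : Nat => s + (k : Int))
            = t.map (fun k : Nat => (s + 1) + (k : Int)) := by
        intro t
        rw [List.map_map]
        apply List.map_congr_left
        intro a _
        simp only [Function.comp]
        push_cast
        ring
      rw [PySem.List.enumerate_cons, List.filterMap_cons]
      by_cases h : pvIsHeader l = true
      · simp only [h, if_pos, pvHIdx, List.map_cons, hm, ih (s + 1)]
        simp
      · simp only [pvHIdx, h, if_neg, Bool.false_eq_true, if_false, hm, ih (s + 1)]

-- B's slice map over the natural-number index pairs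
def pvG (lines : List String) : List (List String) :=
  ((pvHIdx lines).zip ((pvHIdx lines).drop 1 ++ [lines.length])).map
    (fun p => (lines.drop p.1).take (p.2 - p.1))

-- mapping f over the index list maps f componentwise over the consecutive pairs
lemma pvZipPairsMap {α β : Type} (f : α → β) (xs : List α) (a : α) :
    ((xs.map f).zip ((xs.map f).drop 1 ++ [f a]))
      = (xs.zip (xs.drop 1 ++ [a])).map (fun p => (f p.1, f p.2)) := by
  have h1 : (xs.map f).drop 1 ++ [f a] = (xs.drop 1 ++ [a]).map f := by
    rw [List.map_append, List.map_drop]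
    rfl
  rw [h1, List.zip_map]
  apply List.map_congr_left
  intro p _
  cases p
  rfl

lemma pvShift (l : String) (rest : List String) :
    ((((pvHIdx rest).map (· + 1)).zip
        (((pvHIdx rest).map (· + 1)).drop 1 ++ [(l :: rest).length])).map
      (fun p => ((l :: rest).drop p.1).take (p.2 - p.1))) = pvG rest := by
  have hlen : (l :: rest).length = (fun k => k + 1) rest.length := by simp
  rw [hlen, pvZipPairsMap (fun k => k + 1) (pvHIdx rest) rest.length, List.map_map, pvG]
  apply List.map_congr_left
  intro p _
  simp [Function.comp, List.drop_succ_cons, Nat.succ_sub_succ]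

lemma pvG_eq_groups (lines : List String) : pvG lines = pvGroups lines := by
  induction lines with
  | nil => simp [pvG, pvGroups, pvHIdx]
  | cons l rest ih =>
      by_cases h : pvIsHeader l = true
      · rw [pvGroups, if_pos h, pvG]
        have hH : pvHIdx (l :: rest) = 0 :: (pvHIdx rest).map (· + 1) := by
          simp [pvHIdx, h]
        have htw := pvTakeWhile_eq_take rest
        have hdw := pvDropWhile_eq_drop rest
        have htail := pvShift l rest
        rw [hH]
        cases hh : pvHIdx rest with
        | nil =>
            rw [hh] at htw hdw htail
            simp only [List.map_nil, List.headD_nil] at htw hdw htail ⊢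
            simp [htw, hdw, ← ih, pvG, hh, pvGroups]
        | cons a t =>
            rw [hh] at htw hdw htail
            simp only [List.map_cons, List.drop_succ_cons, List.drop_zero,
              List.cons_append, List.zip_cons_cons, List.map_cons,
              List.headD_cons] at htail ⊢
            congr 1
            · simp [List.take_succ_cons, htw]
            · rw [htail, ih, ← pvGroups_dropWhile rest]
      · rw [pvGroups, if_neg (by simp [h]), pvG]
        have hH : pvHIdx (l :: rest) = (pvHIdx rest).map (· + 1) := by
          simp [pvHIdx, h]
        rw [hH, pvShift l rest, ih]

lemma pvAlt_eq_groups (diff : String) :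
    split_into_file_sections_py_alt diff = pvGroups (PySem.Str.splitlines diff) := by
  rw [split_into_file_sections_py_alt]
  set lines := PySem.Str.splitlines diff with hl
  rw [pvEnum_filterMap lines 0]
  have hcast : (pvHIdx lines).map (fun k : Nat => (0 : Int) + (k : Int))
      = (pvHIdx lines).map (fun k : Nat => (k : Int)) := by
    apply List.map_congr_left
    intro a _
    ring
  rw [hcast]
  have hlen : (lines.length : Int) = (fun k : Nat => (k : Int)) lines.length := rfl
  rw [hlen, pvZipPairsMap (fun k : Nat => (k : Int)) (pvHIdx lines) lines.length,
    List.map_map, ← pvG_eq_groups, pvG]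
  apply List.map_congr_left
  intro p _
  simp [Function.comp, PySem.List.slice_natCast]

-- ===== VERDICT (by name: the statement is the Claim_ definition above) =====
theorem split_into_file_sections_py_spec : Claim_equal_split_into_file_sections_py := by
  intro diff _
  unfold Spec_split_into_file_sections_py
  rw [split_into_file_sections_py, pvLoopA_empty, pvAlt_eq_groups]
  simp
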